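-- pv_equiv track=rewrite | github.com/Bcontrerascoloma/Intro_Progra | Tarea_1/tarea1.py | quitarPunto
-- ===== SOURCE A (Python) =====
-- def agregar(punto,ruta):
--     n = ruta * 10**4  #Esto lo hago para poder mover en 4 espacios hacia la izquierda la ruta original y llenar con 0
--     ruta_nueva = n + punto
--     return ruta_nueva
--
-- def primerPunto(ruta):
--     return (ruta%(10**4))
--
-- def restoRuta(ruta):
--     return (ruta//(10**4)) # con la division parte entera lo que hacemos es "quitar" las n cifras correspondientes a la potencia de base 10
--
-- def quitarPunto(punto,ruta):
--     if ruta ==0: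
--         return 0
-- #pensando las coordenadas como trenes
--     if primerPunto(ruta) == punto: #caso en que queramos eliminar el primer punto
--         return restoRuta(ruta)
--     else:
--         sigamosBuscando = quitarPunto(punto,restoRuta(ruta))
-- #ejecutamos la funcion de forma recursiva, pues como el primer punto no era el punto a eliminar seguimos buscando en el resto de la ruta hasta que lleguemos al caso base de que punto == primerPunto
--         return agregar(primerPunto(ruta), sigamosBuscando)
-- ===== SOURCE B (Python) =====
-- def quitarPunto(punto, ruta):
--     # peel the route into its 4-digit points (low-order first)
--     points = []
--     r = ruta
--     while r != 0:
--         points.append(r % 10000)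
--         r //= 10000
--     # drop the first point equal to punto
--     result = []
--     removed = False
--     for p in points:
--         if not removed and p == punto:
--             removed = True
--         else:
--             result.append(p)
--     # rebuild the integer from the highest-order point down
--     value = 0
--     for p in reversed(result):
--         value = value * 10000 + p
--     return value
-- ===== Notes on version B (the rewrite author's own statement) =====
-- stated objective: alternative
-- what changed: Replaces A's recursion (which rebuilds the result on the way back up the call stack) by three flat loops: peel the integer into a list of 4-digit points, remove the first match with a flag scan, and fold the survivors back into an integer.
import Mathlib
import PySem

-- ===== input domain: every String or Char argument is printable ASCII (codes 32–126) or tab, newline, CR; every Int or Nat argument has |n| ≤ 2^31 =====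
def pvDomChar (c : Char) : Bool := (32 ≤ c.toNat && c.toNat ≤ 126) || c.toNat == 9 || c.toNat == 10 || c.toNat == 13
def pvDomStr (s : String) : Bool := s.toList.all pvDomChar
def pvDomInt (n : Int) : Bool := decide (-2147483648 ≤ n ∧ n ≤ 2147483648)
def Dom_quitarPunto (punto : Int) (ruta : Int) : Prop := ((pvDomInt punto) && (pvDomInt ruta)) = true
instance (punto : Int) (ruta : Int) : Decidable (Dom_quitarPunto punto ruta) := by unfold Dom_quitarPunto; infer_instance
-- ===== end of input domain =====

-- B replaces A's recursion by three flat loops (peel into 4-digit points, flag-scan removal,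
-- fold back into an integer); same values for all ruta ≥ 0 (on ruta < 0 A raises RecursionError).


-- termination helper for both ports (cited in decreasing_by)
theorem pvFdivLt (a : Int) (h : 0 < a) : (PySem.Int.floordiv a 10000).toNat < a.toNat := by
  rw [PySem.Int.floordiv_eq_ediv_of_pos (by norm_num)]
  have h1 := Int.mul_ediv_add_emod a 10000
  have h2 := Int.emod_nonneg a (by norm_num : (10000:Int) ≠ 0)
  have h3 : 0 ≤ a / 10000 := Int.ediv_nonneg (by omega) (by norm_num)
  have h4 : a / 10000 < a := by nlinarith
  omega

-- ===== PORT A =====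
def agregar (punto : Int) (ruta : Int) : Int :=
  ruta * 10000 + punto

def primerPunto (ruta : Int) : Int :=
  PySem.Int.mod ruta 10000

def restoRuta (ruta : Int) : Int :=
  PySem.Int.floordiv ruta 10000

-- 'if ruta ≤ 0' is a totality guard for Python's 'if ruta == 0': on ruta < 0 Python recurses forever.
def quitarPunto (punto : Int) (ruta : Int) : Int :=
  if ruta ≤ 0 then 0
  else if primerPunto ruta = punto then restoRuta ruta
  else agregar (primerPunto ruta) (quitarPunto punto (restoRuta ruta))
termination_by ruta.toNat
decreasing_by simp only [restoRuta]; exact pvFdivLt _ (by omega)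

-- ===== PORT B =====
-- 'while r != 0: points.append(r % 10000); r //= 10000'
-- ('r ≤ 0' is a totality guard: on ruta < 0 Python's loop never terminates)
def peelPoints (r : Int) : List Int :=
  if r ≤ 0 then []
  else PySem.Int.mod r 10000 :: peelPoints (PySem.Int.floordiv r 10000)
termination_by r.toNat
decreasing_by exact pvFdivLt _ (by omega)

-- the 'for p in points' loop with the 'removed' flag, building 'result'
def removeScan (punto : Int) : List Int → Bool → List Int
  | [], _ => []
  | p :: ps, removed =>
      if !removed && p == punto then removeScan punto ps true
      else p :: removeScan punto ps removed

-- 'for p in reversed(result): value = value * 10000 + p'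
def rebuild (result : List Int) : Int :=
  result.reverse.foldl (fun value p => value * 10000 + p) 0

def quitarPunto_alt (punto : Int) (ruta : Int) : Int :=
  rebuild (removeScan punto (peelPoints ruta) false)

-- ===== PRECONDITION & SPEC =====
-- Pre_ excludes ruta < 0: there Python's A raises RecursionError (it recurses on ruta = -1 forever).
def Pre_quitarPunto (punto : Int) (ruta : Int) : Prop := 0 ≤ ruta
instance (punto : Int) (ruta : Int) : Decidable (Pre_quitarPunto punto ruta) := by unfold Pre_quitarPunto; infer_instance
def pvWitness_quitarPunto : Int × Int := (5678, 12345678)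

def Spec_quitarPunto (punto : Int) (ruta : Int) (out : Int) : Prop := out = quitarPunto_alt punto ruta
instance (punto : Int) (ruta : Int) (out : Int) : Decidable (Spec_quitarPunto punto ruta out) := by unfold Spec_quitarPunto; infer_instance

-- ===== CLAIM (what is proved, stated in full; the proofs are below) =====
def Claim_equal_quitarPunto : Prop := ∀ (punto : Int) (ruta : Int), Dom_quitarPunto punto ruta → Pre_quitarPunto punto ruta → Spec_quitarPunto punto ruta (quitarPunto punto ruta)

-- ===== LEMMAS AND PROOFS =====

theorem pvFdivNonneg (a : Int) (h : 0 ≤ a) : 0 ≤ PySem.Int.floordiv a 10000 := by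
  rw [PySem.Int.floordiv_eq_ediv_of_pos (by norm_num)]
  exact Int.ediv_nonneg h (by norm_num)

theorem rebuild_cons (a : Int) (l : List Int) :
    rebuild (a :: l) = rebuild l * 10000 + a := by
  simp [rebuild, List.foldl_append]

-- once the flag is set the scan copies the rest of the list
theorem removeScan_true (punto : Int) (l : List Int) :
    removeScan punto l true = l := by
  induction l with
  | nil => rfl
  | cons p ps ih => simp [removeScan, ih]

-- rebuilding the untouched peel gives the route back
theorem rebuild_peelPoints (r : Int) (h : 0 ≤ r) :
    rebuild (peelPoints r) = r := by
  by_cases h0 : r ≤ 0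
  · rw [peelPoints, if_pos h0]
    have : r = 0 := by omega
    simp [rebuild, this]
  · have ih := rebuild_peelPoints (PySem.Int.floordiv r 10000) (pvFdivNonneg r h)
    rw [peelPoints, if_neg h0, rebuild_cons, ih]
    exact PySem.Int.floordiv_mul_add_mod r 10000
termination_by r.toNat
decreasing_by exact pvFdivLt _ (by omega)

theorem quitarPunto_eq_alt (punto ruta : Int) (h : 0 ≤ ruta) :
    quitarPunto punto ruta = quitarPunto_alt punto ruta := by
  by_cases h0 : ruta ≤ 0
  · rw [quitarPunto, if_pos h0]
    unfold quitarPunto_alt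
    rw [peelPoints, if_pos h0]
    rfl
  · have hr' : 0 ≤ PySem.Int.floordiv ruta 10000 := pvFdivNonneg ruta h
    have ih := quitarPunto_eq_alt punto (PySem.Int.floordiv ruta 10000) hr'
    rw [quitarPunto, if_neg h0]
    unfold quitarPunto_alt
    rw [peelPoints, if_neg h0]
    by_cases hm : primerPunto ruta = punto
    · rw [if_pos hm]
      have hb : (PySem.Int.mod ruta 10000 == punto) = true := by
        rw [beq_iff_eq]; exact hm
      rw [show removeScan punto (PySem.Int.mod ruta 10000 :: peelPoints (PySem.Int.floordiv ruta 10000)) false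
            = removeScan punto (peelPoints (PySem.Int.floordiv ruta 10000)) true from by
        simp only [removeScan, Bool.not_false, Bool.true_and, hb, if_true]]
      rw [removeScan_true, rebuild_peelPoints _ hr']
      rfl
    · rw [if_neg hm]
      have hb : (PySem.Int.mod ruta 10000 == punto) = false := by
        rw [beq_eq_false_iff_ne]; exact hm
      rw [show removeScan punto (PySem.Int.mod ruta 10000 :: peelPoints (PySem.Int.floordiv ruta 10000)) false
            = PySem.Int.mod ruta 10000 :: removeScan punto (peelPoints (PySem.Int.floordiv ruta 10000)) false from by
        simp only [removeScan, Bool.not_false, Bool.true_and, hb, Bool.false_eq_true, if_false]]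
      rw [rebuild_cons]
      unfold quitarPunto_alt at ih
      rw [show restoRuta ruta = PySem.Int.floordiv ruta 10000 from rfl, ih]
      rfl
termination_by ruta.toNat
decreasing_by exact pvFdivLt _ (by omega)

-- ===== VERDICT (by name: the statement is the Claim_ definition above) =====
theorem quitarPunto_spec : Claim_equal_quitarPunto := by
  intro punto ruta _ hpre
  unfold Spec_quitarPunto
  exact quitarPunto_eq_alt punto ruta hpre
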